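-- pv_equiv track=rewrite | github.com/TerryPei/NNRetrieval | src/data/dataset/utils.py | build_macro_graph
-- ===== SOURCE A (Python) =====
-- def build_macro_graph(list_subgraph, n_type=int):
--
--     macro_arch_graph = []
--
--     # compare each two subgraphs
--     for idx_i, sg_i in enumerate(list_subgraph):
--         for idx_j, sg_j in enumerate(list_subgraph[idx_i+1:]):
--             idx_j += idx_i + 1
--             # compare each two nodes in subgraph
--             for n_ii, n_ij in sg_i:
--                 is_match = False
--                 for n_ji, n_jj in sg_j:
--                     # if match
--                     if n_ii == n_ji and n_ij == n_jj:
--                         macro_arch_graph.append((n_type(idx_i), n_type(idx_j)))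
--                         is_match = True
--                         break
--                 if is_match:
--                     break
--
--     return macro_arch_graph
-- ===== SOURCE B (Python) =====
-- def build_macro_graph(list_subgraph, n_type=int):
--     # inverted index: edge -> list of the indices of the subgraphs containing it,
--     # one entry per occurrence, indices non-decreasing
--     occ = {}
--     for idx, sg in enumerate(list_subgraph):
--         for e in sg:
--             occ[e] = occ.get(e, []) + [idx]
--     n = len(list_subgraph)
--     # neighbour sets: j in neigh[i]  <=>  i < j and subgraphs i and j share an edge
--     neigh = [set() for _ in range(n)]
--     for ids in occ.values():
--         for k in range(len(ids)):
--             a = ids[k]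
--             neigh[a].update(j for j in ids[k + 1:] if j != a)
--     return [(n_type(i), n_type(j)) for i in range(n) for j in sorted(neigh[i])]
-- ===== Notes on version B (the rewrite author's own statement) =====
-- stated objective: faster
-- what changed: Replaces A's all-pairs comparison of subgraphs (nested edge scans with break flags) by an inverted index from each edge to the subgraphs containing it, from which co-occurring index pairs are collected into per-index neighbour sets and emitted in sorted order.
import Mathlib
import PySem

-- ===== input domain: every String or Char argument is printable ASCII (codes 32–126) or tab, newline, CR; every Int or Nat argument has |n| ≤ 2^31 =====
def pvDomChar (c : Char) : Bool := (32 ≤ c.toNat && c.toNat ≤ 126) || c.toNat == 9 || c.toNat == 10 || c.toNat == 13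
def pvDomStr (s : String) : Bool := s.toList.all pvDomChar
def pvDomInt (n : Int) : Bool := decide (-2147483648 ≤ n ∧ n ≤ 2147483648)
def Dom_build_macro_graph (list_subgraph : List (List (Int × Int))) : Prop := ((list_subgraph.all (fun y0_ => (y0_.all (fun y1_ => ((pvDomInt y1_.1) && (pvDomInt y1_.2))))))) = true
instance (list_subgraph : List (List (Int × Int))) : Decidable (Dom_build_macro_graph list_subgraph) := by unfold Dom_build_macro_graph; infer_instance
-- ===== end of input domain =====

-- B replaces A's pairwise comparison of all subgraphs by an inverted index
-- (edge -> occurrence list of subgraph indices) from which the co-occurring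
-- index pairs are collected into per-index neighbour sets and sorted
-- (objective: faster).

-- ===== PORT A =====
-- inner 'for n_ji, n_jj in sg_j: if match: append; break' — true iff the edge occurs in sg_j
def pvMatchRow (e : Int × Int) (sg_j : List (Int × Int)) : Bool :=
  match sg_j with
  | [] => false
  | f :: rest => if e.1 = f.1 ∧ e.2 = f.2 then true else pvMatchRow e rest

-- outer 'for n_ii, n_ij in sg_i: …; if is_match: break'
def pvMatchAny (sg_i sg_j : List (Int × Int)) : Bool :=
  match sg_i with
  | [] => false
  | e :: rest => if pvMatchRow e sg_j then true else pvMatchAny rest sg_j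

def build_macro_graph (list_subgraph : List (List (Int × Int))) : List (Int × Int) :=
  (PySem.List.enumerate list_subgraph).foldl (fun acc p =>
    (PySem.List.enumerate (PySem.List.slice list_subgraph (some (p.1 + 1)) none)).foldl
      (fun acc2 q =>
        if pvMatchAny p.2 q.2 then acc2 ++ [(p.1, q.1 + p.1 + 1)] else acc2) acc) []

-- ===== PORT B =====
def build_macro_graph_alt (list_subgraph : List (List (Int × Int))) : List (Int × Int) :=
  -- occ[e] = occ.get(e, []) + [idx]  for each edge occurrence, in order
  let occ : PySem.Dict (Int × Int) (List Int) :=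
    (PySem.List.enumerate list_subgraph).foldl (fun d p =>
      p.2.foldl (fun d e => d.modify e [] (fun v => v ++ [p.1])) d) PySem.Dict.empty
  let n := list_subgraph.length
  -- neigh = [set() for _ in range(n)]; neigh[a].update(j for j in ids[k+1:] if j != a)
  -- ids[k] and neigh[a] index with a non-negative in-range int (a is an enumerate index), so getD/.toNat/.set are exact
  let neigh : List (PySem.Set Int) :=
    occ.values.foldl (fun ng ids =>
      (List.range ids.length).foldl (fun ng k =>
        ng.set (ids.getD k 0).toNat
          (PySem.Set.update (ng.getD (ids.getD k 0).toNat [])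
            ((ids.drop (k + 1)).filter (fun j => j != ids.getD k 0)))) ng)
      (List.replicate n PySem.Set.empty)
  -- [(i, j) for i in range(n) for j in sorted(neigh[i])]  (n_type = int is the identity)
  (List.range n).flatMap (fun i =>
    (PySem.List.sorted (neigh.getD i []) (fun x => x)).map (fun j => ((i : Int), j)))

-- ===== PRECONDITION & SPEC =====
def Spec_build_macro_graph (list_subgraph : List (List (Int × Int))) (out : List (Int × Int)) : Prop := out = build_macro_graph_alt list_subgraph
instance (list_subgraph : List (List (Int × Int))) (out : List (Int × Int)) : Decidable (Spec_build_macro_graph list_subgraph out) := by unfold Spec_build_macro_graph; infer_instance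

-- ===== CLAIM (what is proved, stated in full; the proofs are below) =====
def Claim_equal_build_macro_graph : Prop := ∀ (list_subgraph : List (List (Int × Int))), Dom_build_macro_graph list_subgraph → Spec_build_macro_graph list_subgraph (build_macro_graph list_subgraph)

-- ===== LEMMAS AND PROOFS =====

-- A's inner loops characterised
theorem pvMatchRow_eq_contains (e : Int × Int) (sg : List (Int × Int)) :
    pvMatchRow e sg = decide (e ∈ sg) := by
  induction sg with
  | nil => simp [pvMatchRow]
  | cons f rest ih =>
      simp only [pvMatchRow, ih]
      by_cases h : e.1 = f.1 ∧ e.2 = f.2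
      · have : e = f := Prod.ext h.1 h.2
        simp [this]
      · have : e ≠ f := by
          intro he; exact h ⟨by rw [he], by rw [he]⟩
        simp [h, this]

theorem pvMatchAny_iff (sg_i sg_j : List (Int × Int)) :
    pvMatchAny sg_i sg_j = true ↔ ∃ e, e ∈ sg_i ∧ e ∈ sg_j := by
  induction sg_i with
  | nil => simp [pvMatchAny]
  | cons e rest ih =>
      simp only [pvMatchAny, pvMatchRow_eq_contains]
      by_cases h : e ∈ sg_j
      · simp only [h, decide_true, if_true, true_iff]
        exact ⟨e, List.mem_cons_self, h⟩
      · simp only [h, decide_false, Bool.false_eq_true, if_false, ih]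
        constructor
        · rintro ⟨f, hf, hf2⟩
          exact ⟨f, List.mem_cons_of_mem _ hf, hf2⟩
        · rintro ⟨f, hf, hf2⟩
          rcases List.mem_cons.mp hf with rfl | hf'
          · exact absurd hf2 h
          · exact ⟨f, hf', hf2⟩

-- enumerate as a map over range (getD form)
theorem pv_enumerate_eq (xs : List (List (Int × Int))) :
    PySem.List.enumerate xs
      = (List.range xs.length).map (fun (k : Nat) => ((k : Int), xs.getD k [])) := by
  rw [PySem.List.enumerate_eq_map_pyRange xs ([] : List (Int × Int))]
  rw [PySem.List.pyRange_one]
  simp only [Int.sub_zero, List.map_map]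
  apply List.map_congr_left
  intro k hk
  simp [PySem.List.pyGetD_natCast]

-- the flat stream of (edge, subgraph-index) occurrences, in program order
def pvStream (l : List (List (Int × Int))) : List ((Int × Int) × Int) :=
  (List.range l.length).flatMap (fun k => (l.getD k []).map (fun e => (e, (k : Int))))

-- B's occ dict as a single fold over the stream
def pvOcc (l : List (List (Int × Int))) : PySem.Dict (Int × Int) (List Int) :=
  (pvStream l).foldl (fun d q => d.modify q.1 [] (fun v => v ++ [q.2])) PySem.Dict.empty

theorem pvOcc_eq (l : List (List (Int × Int))) :
    (PySem.List.enumerate l).foldl (fun d p =>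
      p.2.foldl (fun d e => d.modify e [] (fun v => v ++ [p.1])) d) PySem.Dict.empty
    = pvOcc l := by
  rw [pvOcc, pvStream, List.foldl_flatMap, pv_enumerate_eq]
  simp only [List.foldl_map]

theorem pvOcc_getD (l : List (List (Int × Int))) (e : Int × Int) :
    (pvOcc l).getD e []
      = ((pvStream l).filter (fun q => q.1 == e)).map (fun q => q.2) := by
  rw [pvOcc, PySem.Dict.getD_foldl_modify_append, PySem.Dict.getD_empty, List.nil_append]

theorem pv_mem_stream (l : List (List (Int × Int))) (e : Int × Int) (x : Int) :
    (e, x) ∈ pvStream l ↔ ∃ k, k < l.length ∧ x = (k : Int) ∧ e ∈ l.getD k [] := by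
  simp only [pvStream, List.mem_flatMap, List.mem_range, List.mem_map, Prod.mk.injEq]
  constructor
  · rintro ⟨k, hk, f, hf, h1, h2⟩
    subst h1
    exact ⟨k, hk, h2.symm, hf⟩
  · rintro ⟨k, hk, rfl, hf⟩; exact ⟨k, hk, e, hf, rfl, rfl⟩

-- membership in an occurrence list
theorem pv_mem_occ (l : List (List (Int × Int))) (e : Int × Int) (x : Int) :
    x ∈ (pvOcc l).getD e [] ↔ 0 ≤ x ∧ x.toNat < l.length ∧ e ∈ l.getD x.toNat [] := by
  rw [pvOcc_getD]
  simp only [List.mem_map, List.mem_filter, beq_iff_eq]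
  constructor
  · rintro ⟨q, ⟨hq, rfl⟩, rfl⟩
    obtain ⟨k, hk, h2, hf⟩ := (pv_mem_stream l q.1 q.2).mp (by exact hq)
    rw [h2]
    exact ⟨Int.natCast_nonneg k, by simpa using hk, by simpa using hf⟩
  · rintro ⟨h0, hk, hf⟩
    refine ⟨(e, x), ⟨?_, rfl⟩, rfl⟩
    exact (pv_mem_stream l e x).mpr ⟨x.toNat, hk, (Int.toNat_of_nonneg h0).symm, hf⟩

-- occurrence lists are non-decreasing
theorem pv_occ_sorted (l : List (List (Int × Int))) (e : Int × Int) :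
    ((pvOcc l).getD e []).Pairwise (· ≤ ·) := by
  rw [pvOcc_getD]
  rw [List.pairwise_map]
  apply List.Pairwise.filter
  rw [pvStream, List.pairwise_flatMap]
  constructor
  · intro k _
    rw [List.pairwise_map]
    exact List.pairwise_of_forall_mem_list (fun _ _ _ _ => le_refl _)
  · apply List.pairwise_lt_range.imp
    intro a b hab x hx y hy
    simp only [List.mem_map] at hx hy
    obtain ⟨_, _, rfl⟩ := hx
    obtain ⟨_, _, rfl⟩ := hy
    show ((a : Int)) ≤ (b : Int)
    exact_mod_cast Nat.le_of_lt hab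

theorem pv_occ_keys_nodup (l : List (List (Int × Int))) : (pvOcc l).keys.Nodup := by
  rw [pvOcc]
  exact PySem.Dict.nodup_keys_foldl_modify_key (pvStream l) (fun q => q.1) []
    (fun _ q v => v ++ [q.2]) PySem.Dict.empty PySem.Dict.nodup_keys_empty

theorem pv_mem_occ_keys (l : List (List (Int × Int))) (e : Int × Int) :
    e ∈ (pvOcc l).keys ↔ ∃ k, k < l.length ∧ e ∈ l.getD k [] := by
  rw [pvOcc]
  rw [PySem.Dict.keys_foldl_modify_key (pvStream l) (fun q => q.1) []
    (fun _ q v => v ++ [q.2]) PySem.Dict.empty]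
  rw [PySem.Dict.keys_empty]
  have : PySem.Set.update ([] : PySem.Set (Int × Int)) ((pvStream l).map (fun q => q.1))
      = PySem.Set.ofList ((pvStream l).map (fun q => q.1)) := rfl
  rw [this, PySem.Set.mem_ofList, List.mem_map]
  constructor
  · rintro ⟨q, hq, rfl⟩
    obtain ⟨k, hk, _, hf⟩ := (pv_mem_stream l q.1 q.2).mp (by exact hq)
    exact ⟨k, hk, hf⟩
  · rintro ⟨k, hk, hf⟩
    exact ⟨(e, (k : Int)), (pv_mem_stream l e _).mpr ⟨k, hk, rfl, hf⟩, rfl⟩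

-- a sorted list containing i < j splits at a position holding i with j beyond it
theorem pv_exists_split (ids : List Int) (i j : Int) (h : ids.Pairwise (· ≤ ·))
    (hi : i ∈ ids) (hj : j ∈ ids) (hij : i < j) :
    ∃ k, k < ids.length ∧ ids.getD k 0 = i ∧ j ∈ ids.drop (k + 1) := by
  induction ids with
  | nil => cases hi
  | cons a t ih =>
      rcases List.mem_cons.mp hi with rfl | hi'
      · have hjt : j ∈ t := by
          rcases List.mem_cons.mp hj with rfl | h'
          · exact absurd hij (lt_irrefl _)
          · exact h'
        exact ⟨0, Nat.succ_pos _, rfl, by simpa using hjt⟩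
      · have hle : ∀ y ∈ t, a ≤ y := (List.pairwise_cons.mp h).1
        have hjt : j ∈ t := by
          rcases List.mem_cons.mp hj with rfl | h'
          · exact absurd (lt_of_le_of_lt (hle i hi') hij) (lt_irrefl _)
          · exact h'
        obtain ⟨k, hk, hk1, hk2⟩ := ih (List.pairwise_cons.mp h).2 hi' hjt
        exact ⟨k + 1, by simpa using hk, by simpa using hk1, by simpa using hk2⟩

-- elements beyond a position are at least the element there, in a sorted list
theorem pv_pairwise_le_drop (ids : List Int) (h : ids.Pairwise (· ≤ ·)) (k : Nat)
    (hk : k < ids.length) (x : Int) (hx : x ∈ ids.drop (k + 1)) : ids.getD k 0 ≤ x := by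
  obtain ⟨j, hj, rfl⟩ := List.mem_drop_iff_getElem.mp hx
  rw [List.getD_eq_getElem ids 0 hk]
  exact List.pairwise_iff_getElem.mp h k (k + 1 + j) (by omega) (by omega) (by omega)

-- the flat list of (target, additions) steps of B's neighbour loop
def pvSteps (vals : List (List Int)) : List (Nat × List Int) :=
  vals.flatMap (fun ids => (List.range ids.length).map (fun k =>
    ((ids.getD k 0).toNat, (ids.drop (k + 1)).filter (fun j => j != ids.getD k 0))))

def pvSetStep (ng : List (PySem.Set Int)) (s : Nat × List Int) : List (PySem.Set Int) :=
  ng.set s.1 (PySem.Set.update (ng.getD s.1 []) s.2)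

theorem pvNeigh_eq (vals : List (List Int)) (init : List (PySem.Set Int)) :
    vals.foldl (fun ng ids =>
      (List.range ids.length).foldl (fun ng k =>
        ng.set (ids.getD k 0).toNat
          (PySem.Set.update (ng.getD (ids.getD k 0).toNat [])
            ((ids.drop (k + 1)).filter (fun j => j != ids.getD k 0)))) ng) init
    = (pvSteps vals).foldl pvSetStep init := by
  rw [pvSteps, List.foldl_flatMap]
  simp only [List.foldl_map, pvSetStep]

theorem pv_mem_setfold (S : List (Nat × List Int)) (init : List (PySem.Set Int))
    (i : Nat) (x : Int) (hi : i < init.length) :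
    x ∈ (S.foldl pvSetStep init).getD i []
      ↔ x ∈ init.getD i [] ∨ ∃ s ∈ S, s.1 = i ∧ x ∈ s.2 := by
  induction S generalizing init with
  | nil => simp
  | cons s S ih =>
      rw [List.foldl_cons]
      rw [ih (pvSetStep init s) (by rw [pvSetStep, List.length_set]; exact hi)]
      have hstep : x ∈ (pvSetStep init s).getD i []
          ↔ x ∈ init.getD i [] ∨ (s.1 = i ∧ x ∈ s.2) := by
        by_cases hsi : s.1 = i
        · subst hsi
          rw [pvSetStep, List.getD_eq_getElem _ _ (by rw [List.length_set]; exact hi),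
            List.getElem_set_self (by rw [List.length_set]; exact hi),
            PySem.Set.mem_update, List.getD_eq_getElem _ _ hi]
          tauto
        · rw [pvSetStep, List.getD_eq_getElem _ _ (by rw [List.length_set]; exact hi),
            List.getElem_set_ne hsi, ← List.getD_eq_getElem _ _ hi]
          tauto
      rw [hstep]
      constructor
      · rintro (( h | h) | ⟨t, ht, h1, h2⟩)
        · exact Or.inl h
        · exact Or.inr ⟨s, List.mem_cons_self, h⟩
        · exact Or.inr ⟨t, List.mem_cons_of_mem _ ht, h1, h2⟩
      · rintro (h | ⟨t, ht, h1, h2⟩)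
        · exact Or.inl (Or.inl h)
        · rcases List.mem_cons.mp ht with rfl | ht'
          · exact Or.inl (Or.inr ⟨h1, h2⟩)
          · exact Or.inr ⟨t, ht', h1, h2⟩

theorem pv_nodup_setfold (S : List (Nat × List Int)) (init : List (PySem.Set Int))
    (h : ∀ s ∈ init, s.Nodup) : ∀ s ∈ S.foldl pvSetStep init, s.Nodup := by
  induction S generalizing init with
  | nil => exact h
  | cons s S ih =>
      rw [List.foldl_cons]
      apply ih
      intro t ht
      rcases List.mem_or_eq_of_mem_set ht with ht' | rfl
      · exact h t ht'
      · apply PySem.Set.nodup_update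
        by_cases hlen : s.1 < init.length
        · rw [List.getD_eq_getElem _ _ hlen]; exact h _ (List.getElem_mem hlen)
        · rw [List.getD_eq_default _ _ (by omega)]; exact List.nodup_nil

-- B's neighbour structure, as a fold over the flat step list
def pvNeigh (l : List (List (Int × Int))) : List (PySem.Set Int) :=
  (pvSteps (pvOcc l).values).foldl pvSetStep (List.replicate l.length PySem.Set.empty)

-- the characterisation: j ∈ neigh[i] iff i < j < n and subgraphs i and j share an edge
theorem pv_mem_neigh (l : List (List (Int × Int))) (i : Nat) (hi : i < l.length) (x : Int) :
    x ∈ (pvNeigh l).getD i []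
      ↔ (i : Int) < x ∧ x.toNat < l.length ∧
        ∃ e, e ∈ l.getD i [] ∧ e ∈ l.getD x.toNat [] := by
  rw [pvNeigh, pv_mem_setfold _ _ _ _ (by simpa using hi)]
  have hinit : (List.replicate l.length (PySem.Set.empty : PySem.Set Int)).getD i [] = [] := by
    rw [List.getD_eq_getElem _ _ (by simpa using hi), List.getElem_replicate]; rfl
  rw [hinit]
  simp only [List.not_mem_nil, false_or]
  constructor
  · rintro ⟨s, hs, hs1, hs2⟩
    simp only [pvSteps, List.mem_flatMap, List.mem_map, List.mem_range] at hs
    obtain ⟨ids, hids, k, hk, rfl⟩ := hs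
    -- identify ids as an occurrence list
    rw [PySem.Dict.values_eq_map_keys _ (pv_occ_keys_nodup l) []] at hids
    obtain ⟨e, _, rfl⟩ := List.mem_map.mp hids
    simp only at hs1 hs2
    set ids := (pvOcc l).getD e [] with hids_def
    have ha_mem : ids.getD k 0 ∈ ids := by
      rw [List.getD_eq_getElem _ _ hk]; exact List.getElem_mem hk
    obtain ⟨ha0, hai, hae⟩ := (pv_mem_occ l e _).mp ha_mem
    have haeq : ids.getD k 0 = (i : Int) := by
      rw [← hs1, Int.toNat_of_nonneg ha0]
    obtain ⟨hxd, hxne⟩ := List.mem_filter.mp hs2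
    have hxmem : x ∈ ids := List.mem_of_mem_drop hxd
    obtain ⟨hx0, hxn, hxe⟩ := (pv_mem_occ l e x).mp hxmem
    have hax : ids.getD k 0 ≤ x := pv_pairwise_le_drop ids (pv_occ_sorted l e) k hk x hxd
    have hne : x ≠ ids.getD k 0 := by simpa using hxne
    refine ⟨?_, hxn, e, ?_, hxe⟩
    · rw [haeq] at hax hne; exact lt_of_le_of_ne hax (Ne.symm hne)
    · rw [haeq] at hae
      simpa using hae
  · rintro ⟨hix, hxn, e, hei, hex⟩
    have hx0 : (0 : Int) ≤ x := le_trans (Int.natCast_nonneg i) (le_of_lt hix)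
    set ids := (pvOcc l).getD e [] with hids_def
    have hi_mem : (i : Int) ∈ ids := (pv_mem_occ l e _).mpr
      ⟨Int.natCast_nonneg i, by simpa using hi, by simpa using hei⟩
    have hx_mem : x ∈ ids := (pv_mem_occ l e x).mpr ⟨hx0, hxn, hex⟩
    obtain ⟨k, hk, hk1, hk2⟩ := pv_exists_split ids _ x (pv_occ_sorted l e) hi_mem hx_mem hix
    refine ⟨((ids.getD k 0).toNat, (ids.drop (k + 1)).filter (fun j => j != ids.getD k 0)),
      ?_, by rw [hk1]; exact Int.toNat_natCast i, ?_⟩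
    · simp only [pvSteps, List.mem_flatMap, List.mem_map, List.mem_range]
      refine ⟨ids, ?_, k, hk, rfl⟩
      rw [PySem.Dict.values_eq_map_keys _ (pv_occ_keys_nodup l) []]
      exact List.mem_map.mpr ⟨e, (pv_mem_occ_keys l e).mpr ⟨i, hi, hei⟩, rfl⟩
    · refine List.mem_filter.mpr ⟨hk2, ?_⟩
      rw [hk1]
      simpa using ne_of_gt hix

theorem pv_neigh_nodup (l : List (List (Int × Int))) (i : Nat) :
    ((pvNeigh l).getD i []).Nodup := by
  by_cases hlen : i < (pvNeigh l).length
  · rw [List.getD_eq_getElem _ _ hlen]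
    refine pv_nodup_setfold _ _ ?_ _ (List.getElem_mem hlen)
    intro s hs
    rw [List.eq_of_mem_replicate hs]
    exact List.nodup_nil
  · rw [List.getD_eq_default _ _ (by omega)]; exact List.nodup_nil

-- the canonical per-index neighbour list, as indices
def pvJ (l : List (List (Int × Int))) (i : Nat) : List Nat :=
  ((List.range (l.length - (i + 1))).filter
    (fun t => pvMatchAny (l.getD i []) (l.getD (i + 1 + t) []))).map (fun t => i + 1 + t)

theorem pvJ_mem (l : List (List (Int × Int))) (i : Nat) (j : Nat) :
    j ∈ pvJ l i ↔ i < j ∧ j < l.length ∧ pvMatchAny (l.getD i []) (l.getD j []) = true := by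
  simp only [pvJ, List.mem_map, List.mem_filter, List.mem_range]
  constructor
  · rintro ⟨t, ⟨ht, hp⟩, rfl⟩; exact ⟨by omega, by omega, hp⟩
  · rintro ⟨h1, h2, hp⟩
    exact ⟨j - (i + 1), ⟨by omega, by rw [Nat.add_sub_cancel' (by omega)]; exact hp⟩, by omega⟩

theorem pvJ_pairwise (l : List (List (Int × Int))) (i : Nat) :
    (pvJ l i).Pairwise (· < ·) := by
  rw [pvJ, List.pairwise_map]
  exact (List.pairwise_lt_range.filter _).imp (by omega)

-- sorted(neigh[i]) is exactly the canonical list, cast to Int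
theorem pv_sorted_neigh (l : List (List (Int × Int))) (i : Nat) (hi : i < l.length) :
    PySem.List.sorted ((pvNeigh l).getD i []) (fun x => x)
      = (pvJ l i).map (fun j => ((j : Nat) : Int)) := by
  have hpw : (((pvJ l i).map (fun j => ((j : Nat) : Int))).Pairwise (fun a b => a < b)) := by
    rw [List.pairwise_map]
    exact (pvJ_pairwise l i).imp (fun {a b} h => (Nat.cast_lt (α := Int)).mpr h)
  apply PySem.List.sorted_eq_of_perm_of_pairwise_lt
  · rw [List.perm_ext_iff_of_nodup (hpw.imp ne_of_lt) (pv_neigh_nodup l i)]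
    intro x
    rw [List.mem_map, pv_mem_neigh l i hi x]
    constructor
    · rintro ⟨j, hj, rfl⟩
      obtain ⟨h1, h2, hp⟩ := (pvJ_mem l i j).mp hj
      obtain ⟨e, he1, he2⟩ := (pvMatchAny_iff _ _).mp hp
      exact ⟨by exact_mod_cast h1, by simpa using h2, e, he1, by simpa using he2⟩
    · rintro ⟨hix, hxn, e, he1, he2⟩
      refine ⟨x.toNat, (pvJ_mem l i x.toNat).mpr
        ⟨by omega, hxn, (pvMatchAny_iff _ _).mpr ⟨e, he1, he2⟩⟩, by omega⟩
  · exact hpw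

-- A's inner fold = append-filter-map
theorem pv_inner_fold (sg : List (Int × Int)) (i : Int)
    (xs : List (Int × List (Int × Int))) (acc : List (Int × Int)) :
    xs.foldl (fun acc2 q => if pvMatchAny sg q.2 then acc2 ++ [(i, q.1 + i + 1)] else acc2) acc
      = acc ++ (xs.filter (fun q => pvMatchAny sg q.2)).map (fun q => (i, q.1 + i + 1)) := by
  exact PySem.List.foldl_append_if (fun q => pvMatchAny sg q.2) (fun q => (i, q.1 + i + 1)) xs acc

-- ===== VERDICT (by name: the statement is the Claim_ definition above) =====
theorem build_macro_graph_spec : Claim_equal_build_macro_graph := by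
  intro l _
  unfold Spec_build_macro_graph build_macro_graph build_macro_graph_alt
  simp only [pvOcc_eq, pvNeigh_eq]
  -- rewrite A's outer fold into a flatMap
  have h1 : ∀ (acc : List (Int × Int)),
      (PySem.List.enumerate l).foldl (fun acc p =>
        (PySem.List.enumerate (PySem.List.slice l (some (p.1 + 1)) none)).foldl
          (fun acc2 q =>
            if pvMatchAny p.2 q.2 then acc2 ++ [(p.1, q.1 + p.1 + 1)] else acc2) acc) acc
      = acc ++ (PySem.List.enumerate l).flatMap (fun p =>
          ((PySem.List.enumerate (PySem.List.slice l (some (p.1 + 1)) none)).filter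
              (fun q => pvMatchAny p.2 q.2)).map (fun q => (p.1, q.1 + p.1 + 1))) := by
    intro acc
    rw [← PySem.List.foldl_append_eq_flatMap]
    apply PySem.List.foldl_congr_mem
    intro a p _
    exact pv_inner_fold p.2 p.1 _ a
  rw [h1, List.nil_append]
  rw [pv_enumerate_eq l, List.flatMap_map]
  apply List.flatMap_congr
  intro k hk
  have hk' : k < l.length := List.mem_range.mp hk
  -- A side: slice from (k+1), enumerate, filter, map
  have hslice : PySem.List.slice l (some ((k : Int) + 1)) none = l.drop (k + 1) := by
    have : ((k : Int) + 1) = ((k + 1 : Nat) : Int) := by push_cast; ring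
    rw [this, PySem.List.slice_from_natCast]
  rw [hslice, pv_enumerate_eq (l.drop (k + 1))]
  rw [List.filter_map, List.map_map, List.length_drop]
  -- B side
  have hfold : List.foldl pvSetStep (List.replicate l.length PySem.Set.empty)
      (pvSteps (pvOcc l).values) = pvNeigh l := rfl
  rw [hfold, pv_sorted_neigh l k hk', pvJ, List.map_map, List.map_map]
  have hQ : (List.range (l.length - (k + 1))).filter
        ((fun q => pvMatchAny ((k : Int), l.getD k []).2 q.2) ∘
          (fun (t : Nat) => ((t : Int), (l.drop (k + 1)).getD t [])))
      = (List.range (l.length - (k + 1))).filter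
        (fun t => pvMatchAny (l.getD k []) (l.getD (k + 1 + t) [])) := by
    apply List.filter_congr
    intro t _
    simp only [Function.comp]
    congr 1
    simp [List.getD, List.getElem?_drop]
  rw [hQ]
  apply List.map_congr_left
  intro t _
  simp only [Function.comp, Prod.mk.injEq]
  refine ⟨trivial, ?_⟩
  push_cast
  ring
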